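-- pv_equiv track=rewrite | github.com/0ETI-SCRIPTS/m3u8_download_ffmpeg | index.py | find_group_urls_belonging_to_title
-- ===== SOURCE A (Python) =====
-- def find_group_urls_belonging_to_title(m3u8_urls, title_index):
--     group_urls = []
--     for index in range(title_index+1, len(m3u8_urls)):
--         if m3u8_urls[index].startswith("#"):
--             continue
--         if m3u8_urls[index] == "" or m3u8_urls[index].isspace():
--             break
--
--         group_urls.append(m3u8_urls[index])
--
--     return group_urls
-- ===== SOURCE B (Python) =====
-- def find_group_urls_belonging_to_title(m3u8_urls, title_index):
--     # Build a sorted index of blank-line positions once, binary-search it for the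
--     # first blank at or after title_index+1, then filter comments from that slice.
--     blanks = [i for i, u in enumerate(m3u8_urls) if u == "" or u.isspace()]
--     start = title_index + 1
--     lo, hi = 0, len(blanks)
--     while lo < hi:
--         mid = (lo + hi) // 2
--         if blanks[mid] < start:
--             lo = mid + 1
--         else:
--             hi = mid
--     end = blanks[lo] if lo < len(blanks) else len(m3u8_urls)
--     return [u for u in m3u8_urls[start:end] if not u.startswith("#")]
-- ===== Notes on version B (the rewrite author's own statement) =====
-- stated objective: alternative
-- what changed: Instead of A's forward scan from title_index that interleaves skip-comment/break-on-blank/append, B builds a sorted index of all blank-line positions once, binary-searches it for the first blank at or after title_index+1 to get the group's end, and filters comments out of that slice.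
-- outside the precondition, e.g. on find_group_urls_belonging_to_title(['a', 'b'], -3): A returns ['a', 'b', 'a', 'b'], B returns ['a', 'b']; on find_group_urls_belonging_to_title(['a'], -5): A raises IndexError, B returns ['a']
import Mathlib
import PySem

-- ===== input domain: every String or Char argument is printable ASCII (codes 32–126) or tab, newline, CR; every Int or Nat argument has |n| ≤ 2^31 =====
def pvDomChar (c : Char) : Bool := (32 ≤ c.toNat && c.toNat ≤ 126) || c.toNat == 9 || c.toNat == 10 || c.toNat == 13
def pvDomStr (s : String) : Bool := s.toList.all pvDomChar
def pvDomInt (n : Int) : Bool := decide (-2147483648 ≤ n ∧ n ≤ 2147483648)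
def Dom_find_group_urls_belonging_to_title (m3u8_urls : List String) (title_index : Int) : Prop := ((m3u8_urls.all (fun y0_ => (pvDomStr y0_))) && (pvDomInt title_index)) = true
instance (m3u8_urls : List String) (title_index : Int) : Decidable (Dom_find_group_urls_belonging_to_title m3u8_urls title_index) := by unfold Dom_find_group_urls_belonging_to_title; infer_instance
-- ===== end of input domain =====

-- B replaces A's forward scan-with-break by a precomputed sorted index of blank-line
-- positions plus a binary search for the group's end; return-value equivalence for title_index ≥ -1.

-- ===== PORT A =====
-- A's for-loop over range(title_index+1, len): structural recursion over the index list;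
-- 'continue' = recurse, 'break' = stop, append = cons. The 'none' case of pyGet? is
-- Python's IndexError (excluded by Pre_; unreachable there).
def pvGoA (xs : List String) : List Int → List String
  | [] => []
  | i :: rest =>
    match PySem.List.pyGet? xs i with
    | none => []
    | some u =>
      if PySem.Str.startswith u "#" then pvGoA xs rest
      else if u == "" || PySem.Str.strIsspace u then []
      else u :: pvGoA xs rest

def find_group_urls_belonging_to_title (m3u8_urls : List String) (title_index : Int) : List String :=
  pvGoA m3u8_urls (PySem.List.pyRange (title_index + 1) (m3u8_urls.length : Int) 1)

-- ===== PORT B =====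
-- Source B's first comprehension: positions of the blank lines, in order.
def pvBlanks (xs : List String) : List Int :=
  (PySem.List.enumerate xs 0).filterMap
    (fun p => if p.2 == "" || PySem.Str.strIsspace p.2 then some p.1 else none)

-- Source B's while-loop: binary search for the first element ≥ x (indices are in range,
-- so blanks[mid] is ported as getD with a dummy default).
def pvBisect (blanks : List Int) (x : Int) (lo hi : Nat) : Nat :=
  if _h : lo < hi then
    if blanks.getD ((lo + hi) / 2) 0 < x then pvBisect blanks x ((lo + hi) / 2 + 1) hi
    else pvBisect blanks x lo ((lo + hi) / 2)
  else lo
termination_by hi - lo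
decreasing_by all_goals omega

def find_group_urls_belonging_to_title_alt (m3u8_urls : List String) (title_index : Int) : List String :=
  let blanks := pvBlanks m3u8_urls
  let start := title_index + 1
  let lo := pvBisect blanks start 0 blanks.length
  let endI : Int := if lo < blanks.length then blanks.getD lo 0 else (m3u8_urls.length : Int)
  (PySem.List.slice m3u8_urls (some start) (some endI)).filter
    (fun u => !(PySem.Str.startswith u "#"))

-- ===== PRECONDITION & SPEC =====
-- Pre_ excludes title_index ≤ -2, outside the natural domain (title_index is the index of a
-- title line): there A either raises IndexError (title_index+1 < -len) or traverses the list
-- via Python negative-index wraparound, an accidental duplicated traversal B does not mimic.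
def Pre_find_group_urls_belonging_to_title (m3u8_urls : List String) (title_index : Int) : Prop :=
  -1 ≤ title_index
instance (m3u8_urls : List String) (title_index : Int) : Decidable (Pre_find_group_urls_belonging_to_title m3u8_urls title_index) := by unfold Pre_find_group_urls_belonging_to_title; infer_instance

def pvWitness_find_group_urls_belonging_to_title : List String × Int :=
  (["#EXTINF:1,Title", "http://a/1.ts", "http://a/2.ts", "", "http://b/1.ts"], 0)

def Spec_find_group_urls_belonging_to_title (m3u8_urls : List String) (title_index : Int) (out : List String) : Prop := out = find_group_urls_belonging_to_title_alt m3u8_urls title_index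
instance (m3u8_urls : List String) (title_index : Int) (out : List String) : Decidable (Spec_find_group_urls_belonging_to_title m3u8_urls title_index out) := by unfold Spec_find_group_urls_belonging_to_title; infer_instance

-- ===== CLAIM (what is proved, stated in full; the proofs are below) =====
def Claim_equal_find_group_urls_belonging_to_title : Prop := ∀ (m3u8_urls : List String) (title_index : Int), Dom_find_group_urls_belonging_to_title m3u8_urls title_index → Pre_find_group_urls_belonging_to_title m3u8_urls title_index → Spec_find_group_urls_belonging_to_title m3u8_urls title_index (find_group_urls_belonging_to_title m3u8_urls title_index)

-- ===== LEMMAS AND PROOFS =====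

-- A line starting with '#' is neither empty nor whitespace-only.
theorem pv_blank_of_startswith (u : String) (h : PySem.Str.startswith u "#" = true) :
    (u == "" || PySem.Str.strIsspace u) = false := by
  have h' : ("#".toList) <+: u.toList := by
    rw [← PySem.Chars.startswith_iff]; simpa using h
  obtain ⟨t, ht⟩ := h'
  have hu : u.toList = '#' :: t := by simpa using ht.symm
  have hne : u ≠ "" := by intro he; rw [he] at hu; simp at hu
  simp [hne, hu, PySem.Chars.strIsspace, PySem.Chars.isspace]

-- Proof-side characterisation of the group after position s: delimit at the first
-- blank line, then drop comment lines.
def pvFindEnd : List String → Nat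
  | [] => 0
  | u :: rest => if u == "" || PySem.Str.strIsspace u then 0 else pvFindEnd rest + 1

def pvGoB (L : List String) : List String :=
  (L.take (pvFindEnd L)).filter (fun u => !(PySem.Str.startswith u "#"))

theorem pvGoB_cons (u : String) (L : List String) :
    pvGoB (u :: L) =
      if PySem.Str.startswith u "#" then
        (if u == "" || PySem.Str.strIsspace u then [] else pvGoB L)
      else (if u == "" || PySem.Str.strIsspace u then [] else u :: pvGoB L) := by
  by_cases hb : u = "" ∨ PySem.Chars.strIsspace u.toList = true
  · simp [pvGoB, pvFindEnd, hb]
  · by_cases hs : PySem.Chars.startswith u.toList ['#'] = true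
    · simp [pvGoB, pvFindEnd, hb, hs]
    · simp [pvGoB, pvFindEnd, hb, hs]

-- A's index loop from a ≥ 0 equals the characterisation over the dropped tail.
theorem pv_bridge (xs : List String) :
    ∀ (n : Nat) (a : Int), 0 ≤ a → (xs.length : Int) - a ≤ n →
      pvGoA xs (PySem.List.pyRange a (xs.length : Int) 1) = pvGoB (xs.drop a.toNat) := by
  intro n
  induction n with
  | zero =>
    intro a h0 hn
    rw [PySem.List.pyRange_one_eq_nil (by omega)]
    rw [List.drop_eq_nil_of_le (by omega)]
    rfl
  | succ m ih =>
    intro a h0 hn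
    by_cases hlt : a < (xs.length : Int)
    · have hidx : a.toNat < xs.length := by omega
      rw [PySem.List.pyRange_one_cons hlt]
      rw [List.drop_eq_getElem_cons hidx]
      have hget : PySem.List.pyGet? xs a = some xs[a.toNat] := by
        rw [PySem.List.pyGet?_of_nonneg xs h0, List.getElem?_eq_getElem hidx]
      have hrec : pvGoA xs (PySem.List.pyRange (a + 1) (xs.length : Int) 1)
          = pvGoB (xs.drop (a + 1).toNat) := ih (a + 1) (by omega) (by omega)
      have htn : (a + 1).toNat = a.toNat + 1 := by omega
      rw [htn] at hrec
      rw [pvGoB_cons]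
      unfold pvGoA
      rw [hget]
      by_cases hs : PySem.Str.startswith xs[a.toNat] "#" = true
      · rw [pv_blank_of_startswith _ hs]
        have hs' : PySem.Chars.startswith xs[a.toNat].toList ['#'] = true := by simpa using hs
        simp [hs', hrec]
      · rw [Bool.not_eq_true] at hs
        have hs' : PySem.Chars.startswith xs[a.toNat].toList ['#'] = false := by simpa using hs
        by_cases hb : xs[a.toNat] = "" ∨ PySem.Chars.strIsspace xs[a.toNat].toList = true <;>
          simp [hs', hb, hrec]
    · rw [PySem.List.pyRange_one_eq_nil (by omega)]
      rw [List.drop_eq_nil_of_le (by omega)]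
      rfl

-- Membership in the blank-position index.
theorem pvBlanks_mem (xs : List String) (b : Int) :
    b ∈ pvBlanks xs ↔
      ∃ (k : Nat) (h : k < xs.length),
        b = (k : Int) ∧ (xs[k] == "" || PySem.Str.strIsspace xs[k]) = true := by
  unfold pvBlanks
  rw [List.mem_filterMap]
  constructor
  · rintro ⟨p, hp, hf⟩
    obtain ⟨k, hk, rfl⟩ := (PySem.List.mem_enumerate_iff xs 0 p).1 hp
    by_cases hb : (xs[k] == "" || PySem.Str.strIsspace xs[k]) = true
    · refine ⟨k, hk, ?_, hb⟩
      rw [if_pos hb] at hf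
      simp at hf
      omega
    · rw [if_neg hb] at hf
      cases hf
  · rintro ⟨k, hk, rfl, hb⟩
    refine ⟨((k : Int), xs[k]), (PySem.List.mem_enumerate_iff xs 0 _).2 ⟨k, hk, by simp⟩, ?_⟩
    rw [if_pos hb]

-- The blank-position index is strictly increasing.
theorem pvBlanks_sorted (xs : List String) : (pvBlanks xs).Pairwise (· < ·) := by
  unfold pvBlanks
  rw [List.pairwise_filterMap]
  refine (PySem.List.pairwise_lt_enumerate xs 0).imp ?_
  intro p q hpq b hb b' hb'
  by_cases h1 : (p.2 == "" || PySem.Str.strIsspace p.2) = true <;>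
    by_cases h2 : (q.2 == "" || PySem.Str.strIsspace q.2) = true <;>
      simp at hb hb' <;> omega

-- pvFindEnd is the unique n ≤ |L| with no blank before n and (end of list or blank) at n.
theorem pvFindEnd_eq (L : List String) :
    ∀ n, n ≤ L.length →
      (∀ j, j < n → ¬ (L.getD j "" == "" || PySem.Str.strIsspace (L.getD j "")) = true) →
      (n = L.length ∨ (n < L.length ∧ (L.getD n "" == "" || PySem.Str.strIsspace (L.getD n "")) = true)) →
      pvFindEnd L = n := by
  induction L with
  | nil =>
    intro n hn _ _
    simp at hn
    simp [pvFindEnd, hn]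
  | cons u rest ih =>
    intro n hn hpre hend
    by_cases hb : (u == "" || PySem.Str.strIsspace u) = true
    · have hn0 : n = 0 := by
        by_contra h0
        exact hpre 0 (by omega) (by simpa using hb)
      have hb' : u = "" ∨ PySem.Chars.strIsspace u.toList = true := by simpa using hb
      simp [pvFindEnd, hb', hn0]
    · have hb1 : u ≠ "" := by
        intro he; exact hb (by simp [he])
      have hb2 : PySem.Chars.strIsspace u.toList = false := by
        rcases h : PySem.Chars.strIsspace u.toList with _ | _
        · rfl
        · exact absurd (by simp [PySem.Str.strIsspace, h]) hb
      cases n with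
      | zero =>
        rcases hend with h | ⟨h, hb'⟩
        · simp at h
        · simp at hb'
          exact absurd (by simpa using hb') hb
      | succ m =>
        have hrec : pvFindEnd rest = m := by
          refine ih m (by simpa using hn) ?_ ?_
          · intro j hj
            have := hpre (j + 1) (by omega)
            simpa using this
          · rcases hend with h | ⟨h, hb'⟩
            · left; simpa using h
            · right; exact ⟨by simpa using h, by simpa using hb'⟩
        simp [pvFindEnd, hb1, hb2, hrec]

-- The binary search returns a cut point: everything before it is < x, everything from it on is ≥ x.
theorem pvBisect_spec (bl : List Int) (x : Int) (hs : bl.Pairwise (· < ·)) :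
    ∀ (fuel lo hi : Nat), hi - lo ≤ fuel → lo ≤ hi → hi ≤ bl.length →
      (∀ i, i < lo → bl.getD i 0 < x) →
      (∀ i, hi ≤ i → i < bl.length → ¬ bl.getD i 0 < x) →
      lo ≤ pvBisect bl x lo hi ∧ pvBisect bl x lo hi ≤ hi ∧
      (∀ i, i < pvBisect bl x lo hi → bl.getD i 0 < x) ∧
      (∀ i, pvBisect bl x lo hi ≤ i → i < bl.length → ¬ bl.getD i 0 < x) := by
  have hmono : ∀ (i j : Nat), i < j → (hj : j < bl.length) → bl.getD i 0 < bl.getD j 0 := by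
    intro i j hij hj
    have hi : i < bl.length := by omega
    rw [List.getD_eq_getElem bl 0 hi, List.getD_eq_getElem bl 0 hj]
    exact List.pairwise_iff_getElem.1 hs i j hi hj hij
  intro fuel
  induction fuel with
  | zero =>
    intro lo hi hf hlh _ hlow hhigh
    have : lo = hi := by omega
    subst this
    rw [pvBisect]
    simp only [lt_irrefl, dite_false]
    exact ⟨le_refl _, le_refl _, hlow, hhigh⟩
  | succ m ih =>
    intro lo hi hf hlh hhl hlow hhigh
    rw [pvBisect]
    by_cases h : lo < hi
    · simp only [h, dite_true]
      by_cases hc : bl.getD ((lo + hi) / 2) 0 < x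
      · simp only [hc, if_true]
        have hres := ih ((lo + hi) / 2 + 1) hi (by omega) (by omega) hhl
          (by
            intro i hi'
            rcases Nat.lt_succ_iff_lt_or_eq.1 hi' with h' | h'
            · rcases Nat.lt_or_ge i ((lo + hi) / 2) with h'' | h''
              · exact lt_trans (hmono i _ h'' (by omega)) hc
              · have : i = (lo + hi) / 2 := by omega
                subst this; exact hc
            · subst h'; exact hc)
          hhigh
        exact ⟨by omega, hres.2.1, hres.2.2.1, hres.2.2.2⟩
      · simp only [hc, if_false]
        have hres := ih lo ((lo + hi) / 2) (by omega) (by omega) (by omega) hlow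
          (by
            intro i hi' hil
            rcases Nat.lt_or_ge ((lo + hi) / 2) i with h'' | h''
            · intro hlt
              exact hc (lt_trans (hmono _ i h'' hil) hlt)
            · have : i = (lo + hi) / 2 := by omega
              subst this; exact hc)
        exact ⟨hres.1, by omega, hres.2.2.1, hres.2.2.2⟩
    · simp only [h, dite_false]
      have : lo = hi := by omega
      subst this
      exact ⟨le_refl _, le_refl _, hlow, hhigh⟩

-- ===== VERDICT (by name: the statement is the Claim_ definition above) =====
theorem find_group_urls_belonging_to_title_spec : Claim_equal_find_group_urls_belonging_to_title := by
  intro xs t _ hpre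
  have h0 : (0 : Int) ≤ t + 1 := by
    have ht : (-1 : Int) ≤ t := hpre
    omega
  set s : Nat := (t + 1).toNat with hsdef
  have hst : t + 1 = (s : Int) := by omega
  set bl := pvBlanks xs with hbl
  have hA : find_group_urls_belonging_to_title xs t = pvGoB (xs.drop s) := by
    show pvGoA xs (PySem.List.pyRange (t + 1) (xs.length : Int) 1) = pvGoB (xs.drop s)
    exact pv_bridge xs xs.length (t + 1) h0 (by omega)
  set k := pvBisect bl (t + 1) 0 bl.length with hk
  have hspec := pvBisect_spec bl (t + 1) (pvBlanks_sorted xs) bl.length 0 bl.length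
    (by omega) (by omega) (le_refl _) (by intro i h; omega) (by intro i h h'; omega)
  rw [← hk] at hspec
  obtain ⟨-, hkle, hbefore, hafter⟩ := hspec
  have hB : find_group_urls_belonging_to_title_alt xs t
      = (PySem.List.slice xs (some (t + 1))
          (some (if k < bl.length then bl.getD k 0 else (xs.length : Int)))).filter
          (fun u => !(PySem.Str.startswith u "#")) := rfl
  show find_group_urls_belonging_to_title xs t = find_group_urls_belonging_to_title_alt xs t
  rw [hA, hB]
  unfold pvGoB
  have hgd : ∀ j (hsj : s + j < xs.length), (xs.drop s).getD j "" = xs[s + j]'hsj := by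
    intro j hsj
    rw [List.getD_eq_getElem?_getD, List.getElem?_drop, ← List.getD_eq_getElem?_getD,
      List.getD_eq_getElem xs "" hsj]
  by_cases hkl : k < bl.length
  · -- the first blank at or after s exists, at position bl[k]
    have hmem : bl.getD k 0 ∈ bl := by
      rw [List.getD_eq_getElem bl 0 hkl]; exact List.getElem_mem hkl
    obtain ⟨bn, hbn, hbeq, hbblank⟩ := (pvBlanks_mem xs _).1 hmem
    have hge : ¬ bl.getD k 0 < t + 1 := hafter k (le_refl _) hkl
    have hsbn : s ≤ bn := by omega
    have hfe : pvFindEnd (xs.drop s) = bn - s := by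
      refine pvFindEnd_eq (xs.drop s) (bn - s) (by simp; omega) ?_ (Or.inr ⟨by simp; omega, ?_⟩)
      · intro j hj hblank
        have hsj : s + j < xs.length := by omega
        rw [hgd j hsj] at hblank
        have hmem' : ((s + j : Nat) : Int) ∈ bl := (pvBlanks_mem xs _).2 ⟨s + j, hsj, rfl, hblank⟩
        obtain ⟨i, hil, hie⟩ := List.mem_iff_getElem.1 hmem'
        have hieD : bl.getD i 0 = ((s + j : Nat) : Int) := by
          rw [List.getD_eq_getElem bl 0 hil, hie]
        have hik : k ≤ i := by
          by_contra hik
          have := hbefore i (by omega)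
          omega
        rcases Nat.eq_or_lt_of_le hik with h' | h'
        · subst h'; omega
        · have hlt := List.pairwise_iff_getElem.1 (pvBlanks_sorted xs) k i hkl hil h'
          have hlt' : bl.getD k 0 < bl.getD i 0 := by
            rw [List.getD_eq_getElem bl 0 hkl, List.getD_eq_getElem bl 0 hil]
            exact hlt
          omega
      · have heq : s + (bn - s) = bn := by omega
        rw [hgd (bn - s) (by omega)]
        simp only [heq]
        exact hbblank
    rw [if_pos hkl, hbeq, hst, hfe, PySem.List.slice_natCast]
  · -- no blank at or after s: the group runs to the end of the list
    have hfe : pvFindEnd (xs.drop s) = xs.length - s := by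
      refine pvFindEnd_eq (xs.drop s) (xs.length - s) (by simp) ?_ (Or.inl (by simp))
      intro j hj hblank
      have hsj : s + j < xs.length := by omega
      rw [hgd j hsj] at hblank
      have hmem' : ((s + j : Nat) : Int) ∈ bl := (pvBlanks_mem xs _).2 ⟨s + j, hsj, rfl, hblank⟩
      obtain ⟨i, hil, hie⟩ := List.mem_iff_getElem.1 hmem'
      have := hbefore i (by omega)
      rw [List.getD_eq_getElem bl 0 hil, hie] at this
      omega
    rw [if_neg hkl, hst, hfe, PySem.List.slice_natCast]
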